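-- pv_equiv track=rewrite | github.com/doodabomb89/duty_planner_web | app.py | _compact_days_csv
-- ===== SOURCE A (Python) =====
-- from typing import List, Set, Tuple, Dict, Optional, Any
--
-- def _compact_days_csv(iso_list: List[str]) -> str:
--     """
--     Turn ISO dates into a compact CSV of DD or DD-DD ranges, sorted ascending.
--     Example: ['2025-10-18','2025-10-19','2025-10-20','2025-10-21','2025-10-25','2025-10-31']
--       -> '18-21,25,31'
--     """
--     days: List[int] = []
--     for iso in iso_list or []:
--         try:
--             parts = iso.split("-")
--             if len(parts) == 3:
--                 d = int(parts[2])
--                 if 1 <= d <= 31: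
--                     days.append(d)
--         except Exception:
--             pass
--     if not days:
--         return ""
--     days = sorted(set(days))
--     ranges: List[str] = []
--     start = prev = days[0]
--     for x in days[1:]:
--         if x == prev + 1:
--             prev = x
--             continue
--         # close previous run
--         ranges.append(f"{start}-{prev}" if start != prev else f"{start}")
--         start = prev = x
--     # close last run
--     ranges.append(f"{start}-{prev}" if start != prev else f"{start}")
--     return ",".join(ranges)
-- ===== SOURCE B (Python) =====
-- from typing import List
--
-- def _compact_days_csv(iso_list: List[str]) -> str:
--     # Presence-set + dense 1..31 scan: no sorting, runs emitted in one pass over the day range.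
--     seen = set()
--     for iso in iso_list or []:
--         try:
--             parts = iso.split("-")
--             if len(parts) == 3:
--                 d = int(parts[2])
--                 if 1 <= d <= 31:
--                     seen.add(d)
--         except Exception:
--             pass
--     out: List[str] = []
--     start = None
--     for d in range(1, 33):  # 32 is a sentinel that closes the last run
--         if d in seen:
--             if start is None:
--                 start = d
--         elif start is not None:
--             prev = d - 1
--             out.append(f"{start}-{prev}" if start != prev else f"{start}")
--             start = None
--     return ",".join(out)
-- ===== Notes on version B (the rewrite author's own statement) =====
-- stated objective: alternative
-- what changed: B replaces A's sort of the unique day set followed by run-compression with a presence set queried during one dense scan of the fixed day range 1..32, emitting runs as presence turns off; no sorting is performed.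
import Mathlib
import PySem

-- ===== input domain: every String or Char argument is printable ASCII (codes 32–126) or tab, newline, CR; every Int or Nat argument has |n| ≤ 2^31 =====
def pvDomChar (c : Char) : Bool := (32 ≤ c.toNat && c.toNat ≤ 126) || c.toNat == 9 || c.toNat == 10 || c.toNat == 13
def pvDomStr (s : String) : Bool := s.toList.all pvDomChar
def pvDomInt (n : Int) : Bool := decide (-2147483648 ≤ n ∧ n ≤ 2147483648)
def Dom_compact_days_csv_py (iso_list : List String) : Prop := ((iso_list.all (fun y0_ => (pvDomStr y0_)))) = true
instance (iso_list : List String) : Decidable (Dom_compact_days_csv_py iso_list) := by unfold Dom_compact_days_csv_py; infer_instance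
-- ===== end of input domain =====

-- B replaces A's sort-then-run-compress of the unique days by a presence set scanned densely
-- over the fixed day range 1..32 (objective: alternative — no sort, same cost at this size).

-- shared by both ports: the per-string parse both Pythons perform verbatim
-- (split on "-", three parts, int(parts[2]), keep 1..31; none = filtered out / ValueError)
def pvDay? (iso : String) : Option Int :=
  if ((PySem.Str.split? iso "-").getD []).length = 3 then   -- sep "-" ≠ "", so split? is always `some`
    match PySem.Int.ofStr? (PySem.List.pyGetD ((PySem.Str.split? iso "-").getD []) 2 "") with
    | some d => if 1 ≤ d ∧ d ≤ 31 then some d else none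
    | none => none
  else none

-- f"{start}-{prev}" if start != prev else f"{start}"
def pvFmtRun (start prev : Int) : String :=
  if start ≠ prev then PySem.Str.join "" [PySem.Int.toStr start, "-", PySem.Int.toStr prev]
  else PySem.Int.toStr start

-- ===== PORT A =====
-- A's day-collecting loop
def pvDaysA (iso_list : List String) : List Int :=
  iso_list.foldl (fun days iso => match pvDay? iso with | some d => days ++ [d] | none => days) []

-- A's run-compression loop body (state: ranges, start, prev)
def pvStepA (st : List String × Int × Int) (x : Int) : List String × Int × Int :=
  if x = st.2.2 + 1 then (st.1, st.2.1, x)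
  else (st.1 ++ [pvFmtRun st.2.1 st.2.2], x, x)

def compact_days_csv_py (iso_list : List String) : String :=
  let days := pvDaysA iso_list
  if days = [] then ""
  else
    match PySem.List.sorted (PySem.Set.ofList days) (fun x => x) false with
    | [] => ""   -- unreachable guard: sorted(set(days)) of nonempty days is nonempty
    | d0 :: rest =>
      let st := rest.foldl pvStepA ([], d0, d0)
      PySem.Str.join "," (st.1 ++ [pvFmtRun st.2.1 st.2.2])

-- ===== PORT B =====
-- B's presence-collecting loop
def pvSeenB (iso_list : List String) : PySem.Set Int :=
  iso_list.foldl (fun s iso => match pvDay? iso with | some d => PySem.Set.add s d | none => s)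
    PySem.Set.empty

-- B's dense-scan loop body (state: out, start)
def pvScanStep (seen : PySem.Set Int) (st : List String × Option Int) (d : Int) :
    List String × Option Int :=
  if seen.contains d then
    match st.2 with
    | none => (st.1, some d)
    | some _ => st
  else
    match st.2 with
    | some s => (st.1 ++ [pvFmtRun s (d - 1)], none)
    | none => st

def compact_days_csv_py_alt (iso_list : List String) : String :=
  let seen := pvSeenB iso_list
  let st := (PySem.List.pyRange 1 33 1).foldl (pvScanStep seen) ([], none)
  PySem.Str.join "," st.1

-- ===== PRECONDITION & SPEC =====
def Spec_compact_days_csv_py (iso_list : List String) (out : String) : Prop := out = compact_days_csv_py_alt iso_list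
instance (iso_list : List String) (out : String) : Decidable (Spec_compact_days_csv_py iso_list out) := by unfold Spec_compact_days_csv_py; infer_instance

-- ===== CLAIM (what is proved, stated in full; the proofs are below) =====
def Claim_equal_compact_days_csv_py : Prop := ∀ (iso_list : List String), Dom_compact_days_csv_py iso_list → Spec_compact_days_csv_py iso_list (compact_days_csv_py iso_list)

-- ===== LEMMAS AND PROOFS =====

-- the run decomposition both loops compute: close the current run (start, prev), recurse
def pvRuns : Int → Int → List Int → List String
  | s, p, [] => [pvFmtRun s p]
  | s, p, x :: xs => if x = p + 1 then pvRuns s x xs else pvFmtRun s p :: pvRuns x x xs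

def pvRunsTop : List Int → List String
  | [] => []
  | a :: xs => pvRuns a a xs

lemma pvDay?_bound (iso : String) (d : Int) (h : pvDay? iso = some d) : 1 ≤ d ∧ d ≤ 31 := by
  unfold pvDay? at h
  split at h
  · split at h
    · split at h
      · simp_all
      · simp_all
    · simp_all
  · simp_all

-- A's day-collecting fold keeps all elements in [1,31]
lemma pvDaysA_bound_aux (l : List String) :
    ∀ (days : List Int), (∀ d ∈ days, 1 ≤ d ∧ d ≤ 31) →
    ∀ d ∈ l.foldl (fun days iso => match pvDay? iso with | some d => days ++ [d] | none => days) days,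
      1 ≤ d ∧ d ≤ 31 := by
  induction l with
  | nil => intro days h; simpa using h
  | cons iso rest ih =>
    intro days h
    simp only [List.foldl_cons]
    cases hp : pvDay? iso with
    | none => exact ih days h
    | some x =>
      refine ih (days ++ [x]) ?_
      intro d hd
      rcases List.mem_append.mp hd with h1 | h2
      · exact h d h1
      · simp at h2; subst h2; exact pvDay?_bound iso d hp

lemma pvDaysA_bound (l : List String) : ∀ d ∈ pvDaysA l, 1 ≤ d ∧ d ≤ 31 := by
  unfold pvDaysA
  exact pvDaysA_bound_aux l [] (by simp)

-- B's presence set has exactly the members of A's day list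
lemma pvSeen_mem_aux (l : List String) :
    ∀ (seen : PySem.Set Int) (days : List Int), (∀ d, d ∈ seen ↔ d ∈ days) →
    ∀ d : Int,
      d ∈ l.foldl (fun s iso => match pvDay? iso with | some d => PySem.Set.add s d | none => s) seen ↔
      d ∈ l.foldl (fun days iso => match pvDay? iso with | some d => days ++ [d] | none => days) days := by
  induction l with
  | nil => intro seen days h d; simpa using h d
  | cons iso rest ih =>
    intro seen days h d
    simp only [List.foldl_cons]
    cases hp : pvDay? iso with
    | none => exact ih seen days h d
    | some x =>
      refine ih (PySem.Set.add seen x) (days ++ [x]) ?_ d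
      intro e
      rw [PySem.Set.mem_add, List.mem_append, h e]
      simp

lemma pvSeenB_mem (l : List String) : ∀ d : Int, d ∈ pvSeenB l ↔ d ∈ pvDaysA l := by
  unfold pvSeenB pvDaysA
  exact pvSeen_mem_aux l PySem.Set.empty [] (by intro d; simp [PySem.Set.empty]) 

-- A's run loop computes pvRuns
lemma pvFoldA_runs (xs : List Int) :
    ∀ (acc : List String) (s p : Int),
      (xs.foldl pvStepA (acc, s, p)).1 ++
        [pvFmtRun (xs.foldl pvStepA (acc, s, p)).2.1 (xs.foldl pvStepA (acc, s, p)).2.2] =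
      acc ++ pvRuns s p xs := by
  induction xs with
  | nil => intro acc s p; simp [pvRuns]
  | cons x rest ih =>
    intro acc s p
    simp only [List.foldl_cons, pvRuns, pvStepA]
    by_cases hx : x = p + 1
    · rw [if_pos hx, if_pos hx]
      exact ih acc s x
    · rw [if_neg hx, if_neg hx, ih (acc ++ [pvFmtRun s p]) x x]
      simp

-- closing a run against a list whose head is not adjacent
lemma pvRuns_close (s p : Int) (L : List Int) (h : ∀ x ∈ L, x ≠ p + 1) :
    pvRuns s p L = pvFmtRun s p :: pvRunsTop L := by
  cases L with
  | nil => simp [pvRuns, pvRunsTop]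
  | cons a xs =>
    have : a ≠ p + 1 := h a (by simp)
    simp [pvRuns, pvRunsTop, this]

-- B's dense scan over [lo, 33) computes the same run list
lemma pvScan_eq (seen : PySem.Set Int) :
    ∀ (n : Nat) (lo : Int) (L : List Int) (out : List String) (st : Option Int),
      lo + n = 33 →
      L.Pairwise (· < ·) →
      (∀ x ∈ L, lo ≤ x ∧ x ≤ 31) →
      (∀ d : Int, lo ≤ d → (seen.contains d = true ↔ d ∈ L)) →
      (∀ s : Int, st = some s → lo ≤ 32) →
      (PySem.List.pyRange lo 33 1).foldl (pvScanStep seen) (out, st) =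
        (out ++ (match st with | none => pvRunsTop L | some s => pvRuns s (lo - 1) L), none) := by
  intro n
  induction n with
  | zero =>
    intro lo L out st hlo hpw hbd hseen hst
    have hlo' : lo = 33 := by omega
    subst hlo'
    have hL : L = [] := by
      cases L with
      | nil => rfl
      | cons a xs => exact absurd (hbd a (by simp)) (by omega)
    subst hL
    cases st with
    | none => simp [PySem.List.pyRange_one_eq_nil (by omega : (33:Int) ≤ 33), pvRunsTop]
    | some s => exact absurd (hst s rfl) (by omega)
  | succ n ih =>
    intro lo L out st hlo hpw hbd hseen hst
    have hlt : lo < 33 := by omega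
    rw [PySem.List.pyRange_one_cons hlt, List.foldl_cons]
    by_cases hc : seen.contains lo = true
    · -- lo is present: L = lo :: L'
      have hmem : lo ∈ L := (hseen lo le_rfl).mp hc
      obtain ⟨L', rfl⟩ : ∃ L', L = lo :: L' := by
        cases L with
        | nil => simp at hmem
        | cons a xs =>
          have hla : lo ≤ a := (hbd a (by simp)).1
          have : lo = a := by
            rcases List.mem_cons.mp hmem with h | h
            · exact h
            · have := (List.pairwise_cons.mp hpw).1 lo h; omega
          exact ⟨xs, by rw [this]⟩
      have hlo31 : lo ≤ 31 := (hbd lo (by simp)).2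
      have hpw' : L'.Pairwise (· < ·) := (List.pairwise_cons.mp hpw).2
      have hgt : ∀ x ∈ L', lo < x := (List.pairwise_cons.mp hpw).1
      have hbd' : ∀ x ∈ L', lo + 1 ≤ x ∧ x ≤ 31 := by
        intro x hx
        exact ⟨by have := hgt x hx; omega, (hbd x (by simp [hx])).2⟩
      have hseen' : ∀ d : Int, lo + 1 ≤ d → (seen.contains d = true ↔ d ∈ L') := by
        intro d hd
        rw [hseen d (by omega), List.mem_cons]
        constructor
        · intro h
          rcases h with h | h
          · exfalso; omega
          · exact h
        · intro h; exact Or.inr h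
      cases st with
      | none =>
        have step : pvScanStep seen (out, none) lo = (out, some lo) := by
          simp only [pvScanStep]
          rw [if_pos hc]
        rw [step, ih (lo + 1) L' out (some lo) (by omega) hpw' hbd' hseen'
              (fun s h => by omega)]
        dsimp only
        rw [show lo + 1 - 1 = lo by omega]
        rfl
      | some s =>
        have step : pvScanStep seen (out, some s) lo = (out, some s) := by
          simp only [pvScanStep]
          rw [if_pos hc]
        rw [step, ih (lo + 1) L' out (some s) (by omega) hpw' hbd' hseen'
              (fun t h => by omega)]
        dsimp only
        rw [show lo + 1 - 1 = lo by omega]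
        have h1 : pvRuns s (lo - 1) (lo :: L') = pvRuns s lo L' := by
          simp only [pvRuns]
          rw [if_pos (show lo = lo - 1 + 1 by omega)]
        rw [h1]
    · -- lo absent: all of L lies above lo
      have hnm : lo ∉ L := fun h => hc ((hseen lo le_rfl).mpr h)
      have hbd' : ∀ x ∈ L, lo + 1 ≤ x ∧ x ≤ 31 := by
        intro x hx
        have h1 := hbd x hx
        have h2 : lo ≠ x := fun h => hnm (h ▸ hx)
        exact ⟨by omega, h1.2⟩
      have hseen' : ∀ d : Int, lo + 1 ≤ d → (seen.contains d = true ↔ d ∈ L) :=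
        fun d hd => hseen d (by omega)
      cases st with
      | none =>
        have step : pvScanStep seen (out, none) lo = (out, none) := by
          simp only [pvScanStep]
          rw [if_neg hc]
        rw [step, ih (lo + 1) L out none (by omega) hpw hbd' hseen'
              (fun s h => by simp at h)]
      | some s =>
        have step : pvScanStep seen (out, some s) lo = (out ++ [pvFmtRun s (lo - 1)], none) := by
          simp only [pvScanStep]
          rw [if_neg hc]
        rw [step, ih (lo + 1) L (out ++ [pvFmtRun s (lo - 1)]) none (by omega) hpw hbd' hseen'
              (fun t h => by simp at h)]
        dsimp only
        have hcl : pvRuns s (lo - 1) L = pvFmtRun s (lo - 1) :: pvRunsTop L := by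
          refine pvRuns_close s (lo - 1) L ?_
          intro x hx
          have := (hbd' x hx).1
          omega
        rw [hcl]
        simp

-- ===== VERDICT (by name: the statement is the Claim_ definition above) =====
theorem compact_days_csv_py_spec : Claim_equal_compact_days_csv_py := by
  intro l _hdom
  unfold Spec_compact_days_csv_py
  have hbd : ∀ d ∈ pvDaysA l, 1 ≤ d ∧ d ≤ 31 := pvDaysA_bound l
  set L : List Int := PySem.List.sorted (PySem.Set.ofList (pvDaysA l)) (fun x => x) false with hL
  have hLmem : ∀ d : Int, d ∈ L ↔ d ∈ pvDaysA l := by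
    intro d
    rw [hL, PySem.List.mem_sorted, PySem.Set.mem_ofList]
  have hB : compact_days_csv_py_alt l = PySem.Str.join "," (pvRunsTop L) := by
    unfold compact_days_csv_py_alt
    dsimp only
    rw [pvScan_eq (pvSeenB l) 32 1 L [] none (by norm_num)
          (hL ▸ PySem.List.sorted_ofList_pairwise_lt (pvDaysA l))
          (fun x hx => hbd x ((hLmem x).mp hx))
          (fun d _ => by rw [PySem.Set.contains_iff, pvSeenB_mem l d, ← hLmem d])
          (fun s h => by simp at h)]
    dsimp only
    rw [List.nil_append]
  have hA : compact_days_csv_py l = PySem.Str.join "," (pvRunsTop L) := by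
    unfold compact_days_csv_py
    dsimp only
    by_cases hnil : pvDaysA l = []
    · rw [if_pos hnil]
      have hLnil : L = [] := by
        rw [hL, hnil]
        exact (PySem.List.sorted_eq_nil_iff _ _ _).mpr rfl
      rw [hLnil]
      rfl
    · rw [if_neg hnil, ← hL]
      have hLne : L ≠ [] := by
        intro h
        obtain ⟨d, hd⟩ := List.exists_mem_of_ne_nil _ hnil
        exact absurd ((hLmem d).mpr hd) (by simp [h])
      obtain ⟨d0, rest, hcons⟩ := List.exists_cons_of_ne_nil hLne
      rw [hcons]
      dsimp only
      rw [pvFoldA_runs rest [] d0 d0, List.nil_append]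
      rfl
  rw [hA, hB]
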